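-- pv_equiv track=rewrite | github.com/QuentinDuval/PythonExperiments | dl/Sorting2.py | reverse_evens
-- ===== SOURCE A (Python) =====
-- def reverse_evens(xs):
--     ys = list(range(len(xs)))
--     i = 0
--     j = len(ys) - 1
--     while i < j:
--         while i < len(ys) and xs[ys[i]] % 2:
--             i += 1
--         while j >= 0 and xs[ys[j]] % 2:
--             j -= 1
--         if i < j:
--             ys[i], ys[j] = ys[j], ys[i]
--             i += 1
--             j -= 1
--     return ys
-- ===== SOURCE B (Python) =====
-- def reverse_evens(xs):
--     result = list(range(len(xs)))
--     evens = [i for i in range(len(xs)) if xs[i] % 2 == 0]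
--     for idx, mirror in zip(evens, reversed(evens)):
--         result[idx] = mirror
--     return result
-- ===== Notes on version B (the rewrite author's own statement) =====
-- stated objective: simpler
-- what changed: Replaces A's in-place two-pointer sweep with nested skip loops over a mutating index array by a two-pass gather-then-reflect: collect the even-valued positions once and assign each such position the mirror entry of that list via zip with its reverse.
import Mathlib
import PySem

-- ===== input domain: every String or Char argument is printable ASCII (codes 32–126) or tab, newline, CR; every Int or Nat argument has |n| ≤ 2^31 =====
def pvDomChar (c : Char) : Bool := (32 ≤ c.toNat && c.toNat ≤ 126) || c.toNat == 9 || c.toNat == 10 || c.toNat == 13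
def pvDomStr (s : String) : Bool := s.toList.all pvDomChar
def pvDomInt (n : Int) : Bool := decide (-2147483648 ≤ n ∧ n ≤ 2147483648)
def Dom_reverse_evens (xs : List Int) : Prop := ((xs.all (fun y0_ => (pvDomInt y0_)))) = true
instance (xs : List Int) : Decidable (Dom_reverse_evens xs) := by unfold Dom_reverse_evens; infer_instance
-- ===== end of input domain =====

-- B replaces A's in-place two-pointer sweep by a gather-then-reflect two-pass scheme (objective: simpler).

-- ===== PORT A =====
-- truth test of Python's `xs[ys[k]] % 2`; every index A actually reads is nonnegative and
-- in range, so the total pyGetD with default 0 is exact on all reachable states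
def pvOddAt (xs ys : List Int) (k : Int) : Bool :=
  !(PySem.Int.mod (PySem.List.pyGetD xs (PySem.List.pyGetD ys k 0) 0) 2 == 0)

-- `while i < len(ys) and xs[ys[i]] % 2: i += 1`
def pvScanI (xs ys : List Int) (i : Int) : Int :=
  if h : i < (ys.length : Int) ∧ pvOddAt xs ys i = true then pvScanI xs ys (i + 1) else i
termination_by ((ys.length : Int) - i).toNat
decreasing_by have := h.1; omega

-- `while j >= 0 and xs[ys[j]] % 2: j -= 1`
def pvScanJ (xs ys : List Int) (j : Int) : Int :=
  if h : 0 ≤ j ∧ pvOddAt xs ys j = true then pvScanJ xs ys (j - 1) else j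
termination_by (j + 1).toNat
decreasing_by have := h.1; omega

-- these two monotonicity facts are needed by pvOuter's termination proof, so they stay above it
theorem pvScanI_ge (xs ys : List Int) (i : Int) : i ≤ pvScanI xs ys i := by
  fun_induction pvScanI with
  | case1 i h ih => omega
  | case2 i h => omega

theorem pvScanJ_le (xs ys : List Int) (j : Int) : pvScanJ xs ys j ≤ j := by
  fun_induction pvScanJ with
  | case1 j h ih => omega
  | case2 j h => omega

-- `ys[i], ys[j] = ys[j], ys[i]` (RHS read first, then the two writes)
def pvSwap (ys : List Int) (i j : Int) : List Int :=
  let a := PySem.List.pyGetD ys j 0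
  let b := PySem.List.pyGetD ys i 0
  (ys.set i.toNat a).set j.toNat b

-- the outer `while i < j` loop
def pvOuter (xs ys : List Int) (i j : Int) : List Int :=
  if h : i < j then
    let i' := pvScanI xs ys i
    let j' := pvScanJ xs ys j
    if h2 : i' < j' then pvOuter xs (pvSwap ys i' j') (i' + 1) (j' - 1) else ys
  else ys
termination_by (j - i).toNat
decreasing_by
  have h1 := pvScanI_ge xs ys i
  have h3 := pvScanJ_le xs ys j
  omega

def reverse_evens (xs : List Int) : List Int :=
  let ys := (List.range xs.length).map (fun (k : Nat) => (k : Int))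
  pvOuter xs ys 0 ((ys.length : Int) - 1)

-- ===== PORT B =====
-- `xs[i] % 2 == 0` for 0 ≤ i < len(xs) (all the indices Source B reads)
def pvEvensB (xs : List Int) (i : Nat) : Bool := PySem.Int.mod (xs.getD i 0) 2 == 0

-- `for idx, mirror in zip(evens, reversed(evens)): result[idx] = mirror`
def pvWrite (r : List Int) (ps : List (Nat × Nat)) : List Int :=
  ps.foldl (fun r pq => r.set pq.1 ((pq.2 : Nat) : Int)) r

def reverse_evens_alt (xs : List Int) : List Int :=
  let result := (List.range xs.length).map (fun (k : Nat) => (k : Int))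
  let evens := (List.range xs.length).filter (pvEvensB xs)
  pvWrite result (evens.zip evens.reverse)

-- ===== PRECONDITION & SPEC =====
def Spec_reverse_evens (xs : List Int) (out : List Int) : Prop := out = reverse_evens_alt xs
instance (xs : List Int) (out : List Int) : Decidable (Spec_reverse_evens xs out) := by unfold Spec_reverse_evens; infer_instance

-- ===== CLAIM (what is proved, stated in full; the proofs are below) =====
def Claim_equal_reverse_evens : Prop := ∀ (xs : List Int), Dom_reverse_evens xs → Spec_reverse_evens xs (reverse_evens xs)

-- ===== LEMMAS AND PROOFS =====

-- on a position the sweep has not touched (ys[p] = p) A's parity test is B's parity test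
theorem pvOddAt_of_id (xs ys : List Int) (p : Nat) (h : ys.getD p 0 = (p : Int)) :
    pvOddAt xs ys (p : Int) = !(pvEvensB xs p) := by
  simp only [pvOddAt, pvEvensB, PySem.List.pyGetD_natCast, h]

-- if everything in [i, j] is odd, the i-scan runs past j
theorem pvScanI_gt (xs ys : List Int) (i j : Int)
    (h : ∀ k : Int, i ≤ k → k ≤ j → k < (ys.length : Int) ∧ pvOddAt xs ys k = true) :
    j < pvScanI xs ys i := by
  by_cases hij : j < i
  · exact lt_of_lt_of_le hij (pvScanI_ge xs ys i)
  · have hc := h i le_rfl (by omega)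
    rw [pvScanI, dif_pos hc]
    exact pvScanI_gt xs ys (i + 1) j (fun k hk1 hk2 => h k (by omega) hk2)
termination_by (j + 1 - i).toNat
decreasing_by omega

-- if everything in [i, j] is odd (and i ≥ 0... indices below stay ≥ i), the j-scan drops below i
theorem pvScanJ_lt (xs ys : List Int) (i j : Int) (hi : 0 ≤ i)
    (h : ∀ k : Int, i ≤ k → k ≤ j → pvOddAt xs ys k = true) :
    pvScanJ xs ys j < i := by
  by_cases hij : j < i
  · exact lt_of_le_of_lt (pvScanJ_le xs ys j) hij
  · have hc := h j (by omega) le_rfl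
    rw [pvScanJ, dif_pos ⟨by omega, hc⟩]
    exact pvScanJ_lt xs ys i (j - 1) hi (fun k hk1 hk2 => h k hk1 (by omega))
termination_by (j + 1).toNat
decreasing_by omega

-- the i-scan stops exactly at the first even position e
theorem pvScanI_stop (xs ys : List Int) (i : Int) (e : Nat) (hie : i ≤ (e : Int))
    (hlt : e < ys.length)
    (hodd : ∀ k : Int, i ≤ k → k < (e : Int) → pvOddAt xs ys k = true)
    (heven : pvOddAt xs ys (e : Int) = false) : pvScanI xs ys i = e := by
  by_cases hi : i = (e : Int)
  · subst hi
    rw [pvScanI, dif_neg (by simp [heven])]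
  · have hc : pvOddAt xs ys i = true := hodd i le_rfl (by omega)
    rw [pvScanI, dif_pos ⟨by omega, hc⟩]
    exact pvScanI_stop xs ys (i + 1) e (by omega) hlt (fun k hk1 hk2 => hodd k (by omega) hk2) heven
termination_by ((e : Int) - i).toNat
decreasing_by omega

-- the j-scan stops exactly at the last even position l
theorem pvScanJ_stop (xs ys : List Int) (j : Int) (l : Nat) (hlj : (l : Int) ≤ j)
    (hodd : ∀ k : Int, (l : Int) < k → k ≤ j → pvOddAt xs ys k = true)
    (heven : pvOddAt xs ys (l : Int) = false) : pvScanJ xs ys j = l := by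
  by_cases hj : j = (l : Int)
  · subst hj
    rw [pvScanJ, dif_neg (by simp [heven])]
  · have hc : pvOddAt xs ys j = true := hodd j (by omega) le_rfl
    rw [pvScanJ, dif_pos ⟨by omega, hc⟩]
    exact pvScanJ_stop xs ys (j - 1) l (by omega) (fun k hk1 hk2 => hodd k hk1 (by omega)) heven
termination_by (j + 1).toNat
decreasing_by omega

theorem pvWrite_set_comm (ps : List (Nat × Nat)) (r : List Int) (a : Nat) (v : Int)
    (h : ∀ pq ∈ ps, pq.1 ≠ a) : pvWrite (r.set a v) ps = (pvWrite r ps).set a v := by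
  induction ps generalizing r with
  | nil => rfl
  | cons pq ps ih =>
      show pvWrite ((r.set a v).set pq.1 _) ps = (pvWrite (r.set pq.1 _) ps).set a v
      rw [List.set_comm _ _ (Ne.symm (h pq (by simp)))]
      exact ih (r.set pq.1 _) (fun q hq => h q (by simp [hq]))

theorem pvWrite_append (r : List Int) (ps qs : List (Nat × Nat)) :
    pvWrite r (ps ++ qs) = pvWrite (pvWrite r ps) qs := by
  simp [pvWrite, List.foldl_append]

-- writing ys[e] := e when ys[e] = e already is a no-op
theorem pvSet_self (ys : List Int) (e : Nat) (hlt : e < ys.length)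
    (h : ys.getD e 0 = (e : Int)) : ys.set e (e : Int) = ys := by
  have : (e : Int) = ys[e] := by rw [← h, List.getD_eq_getElem ys 0 hlt]
  rw [this]
  exact List.set_getElem_self hlt

theorem pvGetD_set_ne (r : List Int) (a p : Nat) (v d : Int) (h : a ≠ p) :
    (r.set a v).getD p d = r.getD p d := by
  simp [List.getD, List.getElem?_set_ne h]

-- MAIN INVARIANT: if ys is the identity on [i, j], and es lists (in increasing order)
-- exactly the even-valued positions inside [i, j], then the two-pointer sweep from (i, j)
-- performs exactly the reflected writes of es
theorem pvOuter_eq (xs : List Int) (es : List Nat) (ys : List Int) (i j : Int)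
    (hlen : ys.length = xs.length)
    (hid : ∀ p : Nat, i ≤ (p : Int) → (p : Int) ≤ j → ys.getD p 0 = (p : Int))
    (hj : j < (xs.length : Int)) (hi : 0 ≤ i)
    (hes : ∀ p : Nat, p ∈ es ↔ (p < xs.length ∧ pvEvensB xs p = true ∧ i ≤ (p : Int) ∧ (p : Int) ≤ j))
    (hsort : es.Pairwise (· < ·)) :
    pvOuter xs ys i j = pvWrite ys (es.zip es.reverse) := by
  -- positions of [i, j] that are not in es read as odd (they still hold their own index)
  have hoddAt : ∀ k : Int, i ≤ k → k ≤ j → k.toNat ∉ es → pvOddAt xs ys k = true := by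
    intro k h1 h2 hnm
    have hk0 : 0 ≤ k := le_trans hi h1
    have hkp : ((k.toNat : Nat) : Int) = k := Int.toNat_of_nonneg hk0
    have hidp := hid k.toNat (by omega) (by omega)
    rw [← hkp, pvOddAt_of_id xs ys k.toNat hidp]
    cases heb : pvEvensB xs k.toNat with
    | false => rfl
    | true => exact absurd ((hes k.toNat).mpr ⟨by omega, heb, by omega, by omega⟩) hnm
  match es with
  | [] =>
    have hodd : ∀ k : Int, i ≤ k → k ≤ j → k < (ys.length : Int) ∧ pvOddAt xs ys k = true := by
      intro k h1 h2
      exact ⟨by rw [hlen]; omega, hoddAt k h1 h2 (List.not_mem_nil)⟩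
    by_cases hij : i < j
    · rw [pvOuter, dif_pos hij]
      have h1 := pvScanI_gt xs ys i j hodd
      have h2 := pvScanJ_lt xs ys i j hi (fun k a b => (hodd k a b).2)
      rw [dif_neg (by omega)]
      rfl
    · rw [pvOuter, dif_neg hij]; rfl
  | [e] =>
    obtain ⟨hen, heve, hie, hej⟩ := (hes e).mp (by simp)
    have hevene : pvOddAt xs ys (e : Int) = false := by
      rw [pvOddAt_of_id xs ys e (hid e hie hej), heve]; rfl
    have hself : pvWrite ys ([e].zip [e].reverse) = ys := by
      show ys.set e ((e : Nat) : Int) = ys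
      exact pvSet_self ys e (by omega) (hid e hie hej)
    by_cases hij : i < j
    · rw [pvOuter, dif_pos hij]
      have hI : pvScanI xs ys i = e := by
        refine pvScanI_stop xs ys i e hie (by omega) ?_ hevene
        intro k h1 h2
        refine hoddAt k h1 (by omega) ?_
        simp only [List.mem_singleton]
        omega
      have hJ : pvScanJ xs ys j = e := by
        refine pvScanJ_stop xs ys j e hej ?_ hevene
        intro k h1 h2
        refine hoddAt k (by omega) h2 ?_
        simp only [List.mem_singleton]
        omega
      simp only [hI, hJ]
      rw [dif_neg (lt_irrefl _), hself]
    · rw [pvOuter, dif_neg hij, hself]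
  | e :: x :: rest =>
    obtain ⟨mid, l, hml⟩ : ∃ mid l, x :: rest = mid ++ [l] :=
      ⟨(x :: rest).dropLast, (x :: rest).getLast (by simp),
        (List.dropLast_append_getLast (by simp)).symm⟩
    rw [hml] at hes hsort hoddAt ⊢
    -- ordering facts
    have hlt_e : ∀ q ∈ mid ++ [l], e < q := (List.pairwise_cons.mp hsort).1
    have hsort2 : (mid ++ [l]).Pairwise (· < ·) := (List.pairwise_cons.mp hsort).2
    have hmidl : ∀ q ∈ mid, q < l := by
      intro q hq
      have := (List.pairwise_append.mp hsort2).2.2 q hq l (by simp)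
      exact this
    have hsortm : mid.Pairwise (· < ·) := (List.pairwise_append.mp hsort2).1
    have hel : e < l := hlt_e l (by simp)
    obtain ⟨hen, heve, hie, hej⟩ := (hes e).mp (by simp)
    obtain ⟨hln, hevl, hil, hlj⟩ := (hes l).mp (by simp)
    have hij : i < j := by omega
    have hevene : pvOddAt xs ys (e : Int) = false := by
      rw [pvOddAt_of_id xs ys e (hid e hie hej), heve]; rfl
    have hevenl : pvOddAt xs ys (l : Int) = false := by
      rw [pvOddAt_of_id xs ys l (hid l hil hlj), hevl]; rfl
    have hI : pvScanI xs ys i = e := by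
      refine pvScanI_stop xs ys i e hie (by omega) ?_ hevene
      intro k h1 h2
      refine hoddAt k h1 (by omega) ?_
      intro hm
      rcases List.mem_cons.mp hm with h | h
      · omega
      · have := hlt_e _ h; omega
    have hJ : pvScanJ xs ys j = l := by
      refine pvScanJ_stop xs ys j l hlj ?_ hevenl
      intro k h1 h2
      refine hoddAt k (by omega) h2 ?_
      intro hm
      rcases List.mem_cons.mp hm with h | h
      · omega
      · rcases List.mem_append.mp h with h | h
        · have := hmidl _ h; omega
        · simp at h; omega
    -- the swap writes l at position e and e at position l
    have hswap : pvSwap ys (e : Int) (l : Int) = (ys.set e ((l : Nat) : Int)).set l ((e : Nat) : Int) := by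
      simp only [pvSwap, PySem.List.pyGetD_natCast, hid e hie hej, hid l hil hlj,
        Int.toNat_natCast]
    set ys' : List Int := (ys.set e ((l : Nat) : Int)).set l ((e : Nat) : Int) with hys'
    -- the recursive call: sweep the strict interior with the inner evens
    have hrec : pvOuter xs ys' ((e : Int) + 1) ((l : Int) - 1) = pvWrite ys' (mid.zip mid.reverse) := by
      refine pvOuter_eq xs mid ys' ((e : Int) + 1) ((l : Int) - 1) (by simp [hys', hlen]) ?_ (by omega) (by omega) ?_ hsortm
      · intro p h1 h2
        rw [hys', pvGetD_set_ne _ _ _ _ _ (by omega), pvGetD_set_ne _ _ _ _ _ (by omega)]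
        exact hid p (by omega) (by omega)
      · intro p
        constructor
        · intro hp
          obtain ⟨hpn, hpe, hpi, hpj⟩ := (hes p).mp (by simp [hp])
          have h1 := hlt_e p (by simp [hp])
          have h2 := hmidl p hp
          exact ⟨hpn, hpe, by omega, by omega⟩
        · rintro ⟨hpn, hpe, hpi, hpj⟩
          have hp : p ∈ e :: (mid ++ [l]) := (hes p).mpr ⟨hpn, hpe, by omega, by omega⟩
          rcases List.mem_cons.mp hp with h | h
          · omega
          · rcases List.mem_append.mp h with h | h
            · exact h
            · simp at h; omega
    -- unfold one outer step
    rw [pvOuter, dif_pos hij]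
    simp only [hI, hJ]
    rw [dif_pos (by exact_mod_cast hel), hswap, hrec]
    -- reorganise the reflected writes of e :: mid ++ [l]
    have hzip : (e :: (mid ++ [l])).zip (e :: (mid ++ [l])).reverse
        = (e, l) :: (mid.zip mid.reverse ++ [(l, e)]) := by
      have hr : (e :: (mid ++ [l])).reverse = l :: (mid.reverse ++ [e]) := by simp
      rw [hr, List.zip_cons_cons, List.zip_append (by simp)]
      rfl
    rw [hzip]
    show pvWrite ys' (mid.zip mid.reverse)
        = pvWrite (ys.set e ((l : Nat) : Int)) (mid.zip mid.reverse ++ [(l, e)])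
    rw [pvWrite_append, hys',
      pvWrite_set_comm _ _ _ _ (fun pq hpq => by
        have := hmidl pq.1 ((List.of_mem_zip hpq).1)
        omega)]
    rfl
termination_by es.length
decreasing_by
  have := congrArg List.length hml
  simp at this ⊢
  omega

-- ===== VERDICT (by name: the statement is the Claim_ definition above) =====
theorem reverse_evens_spec : Claim_equal_reverse_evens := by
  intro xs _
  show reverse_evens xs = reverse_evens_alt xs
  unfold reverse_evens reverse_evens_alt
  exact pvOuter_eq xs ((List.range xs.length).filter (pvEvensB xs))
    ((List.range xs.length).map (fun (k : Nat) => (k : Int))) 0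
    ((((List.range xs.length).map (fun (k : Nat) => (k : Int))).length : Int) - 1)
    (by simp)
    (by
      intro p h1 h2
      simp at h2
      exact PySem.List.getD_map_range (fun k => (k : Int)) xs.length p 0 (by omega))
    (by simp)
    le_rfl
    (by
      intro p
      have hl : ((List.range xs.length).map (fun (k : Nat) => (k : Int))).length = xs.length := by
        simp
      rw [hl]
      simp only [List.mem_filter, List.mem_range]
      constructor
      · rintro ⟨h1, h2⟩
        exact ⟨h1, h2, by omega, by omega⟩
      · rintro ⟨h1, h2, -, -⟩
        exact ⟨h1, h2⟩)
    (List.Pairwise.filter _ List.pairwise_lt_range)
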